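-- pv_equiv track=rewrite | github.com/AP-MI-2021/lab-3-dariussandru | main.py | get_longest_same_div_count
-- ===== SOURCE A (Python) =====
-- def nr_divizori(nr):
--     """
--     :param nr: un numar int
--     :return: cati divizori are nr
--     """
--     numar_divizori = 0
--     if nr == 1:
--         numar_divizori = 1
--     else:
--         for i in range(2, (nr // 2) + 1):
--             if nr % i == 0:
--                 numar_divizori += 1
--
--     return numar_divizori
--
-- def get_longest_same_div_count(lista_principala):
--     """
--     Functie care determina cea mai lunga subsecventa in care toate numerele au acelasi numar de divizori
--     :param lst:
--     :return: O lista de intregi care reprezinta cea mai lunga subsecventa in care toate numerele au acelasi numar de divizori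
--     """
--
--     lmax = 0
--     secv_max = []
--     lactual = 1
--     nrdiv = nr_divizori(lista_principala[0])
--     secv_actuala = [lista_principala[0]]
--
--     for n in range (1,len(lista_principala)):
--        if(nr_divizori(lista_principala[n]) == nrdiv):
--             lactual = lactual + 1
--             secv_actuala.append(lista_principala[n])
--        else:
--            if(lactual > lmax):
--                 lmax = lactual
--                 secv_max = secv_actuala
--            secv_actuala = [lista_principala[n]]
--            lactual = 1
--            nrdiv = nr_divizori(lista_principala[n])
--
--     if(lactual > lmax):
--         secv_max = secv_actuala
--     return secv_max
-- ===== SOURCE B (Python) =====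
-- def _tau(n):
--     # number of divisors of n (n >= 1) via factor-pair scan up to sqrt(n)
--     t = 0
--     i = 1
--     while i * i <= n:
--         if n % i == 0:
--             t += 1 if i * i == n else 2
--         i += 1
--     return t
--
-- def _div_count(nr):
--     # same value as A's nr_divizori: divisors strictly between 1 and nr, with 1 -> 1, nr < 2 -> 0
--     if nr == 1:
--         return 1
--     if nr < 2:
--         return 0
--     return _tau(nr) - 2
--
-- def get_longest_same_div_count(lista_principala):
--     cache = {}
--     counts = []
--     for x in lista_principala:
--         if x not in cache:
--             cache[x] = _div_count(x)
--         counts.append(cache[x])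
--     best_start = 0
--     best_len = 0
--     start = 0
--     for i in range(1, len(counts)):
--         if counts[i] != counts[i - 1]:
--             if i - start > best_len:
--                 best_start, best_len = start, i - start
--             start = i
--     if len(counts) - start > best_len:
--         best_start, best_len = start, len(counts) - start
--     return lista_principala[best_start:best_start + best_len]
-- ===== Notes on version B (the rewrite author's own statement) =====
-- stated objective: faster
-- what changed: B counts each number's divisors with a sqrt(nr) factor-pair scan (tau(nr)-2) instead of A's trial loop up to nr//2, caches counts per distinct value in a dict, and tracks the best run by start index and length, returning a slice instead of growing lists.
import Mathlib
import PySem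

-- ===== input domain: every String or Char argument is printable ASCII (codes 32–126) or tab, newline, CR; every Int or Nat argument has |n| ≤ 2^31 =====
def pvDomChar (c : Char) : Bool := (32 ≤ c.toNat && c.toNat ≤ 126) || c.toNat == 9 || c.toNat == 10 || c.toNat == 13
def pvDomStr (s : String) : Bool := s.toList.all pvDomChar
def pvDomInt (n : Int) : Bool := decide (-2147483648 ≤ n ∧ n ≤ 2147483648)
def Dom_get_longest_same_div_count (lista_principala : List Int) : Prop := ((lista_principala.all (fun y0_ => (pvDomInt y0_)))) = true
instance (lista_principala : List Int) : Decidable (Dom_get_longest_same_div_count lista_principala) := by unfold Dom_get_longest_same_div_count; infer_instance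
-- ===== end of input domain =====

-- B replaces A's per-element divisor loop up to nr//2 by a sqrt(nr) factor-pair count (tau(nr)-2),
-- caches the count per distinct value, and tracks the best run by index, returning a slice (objective: faster).

-- ===== PORT A =====
def nr_divizori (nr : Int) : Int :=
  if nr = 1 then 1
  else (PySem.List.pyRange 2 (PySem.Int.floordiv nr 2 + 1) 1).foldl
        (fun acc i => if PySem.Int.mod nr i = 0 then acc + 1 else acc) 0

def pvAStep (l : List Int) (s : Int × List Int × Int × Int × List Int) (n : Int) :
    Int × List Int × Int × Int × List Int :=
  match s with
  | (lmax, secv_max, lactual, nrdiv, secv_actuala) =>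
    if nr_divizori (PySem.List.pyGetD l n 0) = nrdiv then
      (lmax, secv_max, lactual + 1, nrdiv, secv_actuala ++ [PySem.List.pyGetD l n 0])
    else if lactual > lmax then
      (lactual, secv_actuala, 1, nr_divizori (PySem.List.pyGetD l n 0), [PySem.List.pyGetD l n 0])
    else
      (lmax, secv_max, 1, nr_divizori (PySem.List.pyGetD l n 0), [PySem.List.pyGetD l n 0])

def get_longest_same_div_count (lista_principala : List Int) : List Int :=
  let x0 := PySem.List.pyGetD lista_principala 0 0
  let st := (PySem.List.pyRange 1 (lista_principala.length : Int) 1).foldl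
      (pvAStep lista_principala) (0, [], 1, nr_divizori x0, [x0])
  match st with
  | (lmax, secv_max, lactual, _, secv_actuala) =>
    if lactual > lmax then secv_actuala else secv_max

-- ===== PORT B =====
def pvTauLoop (n i t : Int) : Int :=
  if i * i ≤ n then
    pvTauLoop n (i + 1)
      (if PySem.Int.mod n i = 0 then (if i * i = n then t + 1 else t + 2) else t)
  else t
termination_by (n + 1 - i).toNat
decreasing_by
  rename_i h
  have h0 : (0:Int) ≤ i * i := mul_self_nonneg i
  have hi : i ≤ n := by
    by_cases hi : i ≤ 0
    · omega
    · have : i * 1 ≤ i * i := by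
        apply mul_le_mul_of_nonneg_left (by omega) (by omega)
      omega
  omega

def pvDivCount (nr : Int) : Int :=
  if nr = 1 then 1 else if nr < 2 then 0 else pvTauLoop nr 1 0 - 2

def pvCountsStep (p : PySem.Dict Int Int × List Int) (x : Int) : PySem.Dict Int Int × List Int :=
  let cache := if p.1.contains x then p.1 else p.1.insert x (pvDivCount x)
  (cache, p.2 ++ [cache.getD x 0])

def pvBStep (counts : List Int) (s : Int × Int × Int) (i : Int) : Int × Int × Int :=
  match s with
  | (best_start, best_len, start) =>
    if PySem.List.pyGetD counts i 0 ≠ PySem.List.pyGetD counts (i - 1) 0 then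
      if i - start > best_len then (start, i - start, i) else (best_start, best_len, i)
    else (best_start, best_len, start)

def get_longest_same_div_count_alt (lista_principala : List Int) : List Int :=
  let counts := (lista_principala.foldl pvCountsStep (PySem.Dict.empty, [])).2
  let st := (PySem.List.pyRange 1 (counts.length : Int) 1).foldl (pvBStep counts) (0, 0, 0)
  match st with
  | (best_start, best_len, start) =>
    let fin := if (counts.length : Int) - start > best_len
               then (start, (counts.length : Int) - start) else (best_start, best_len)
    PySem.List.slice lista_principala (some fin.1) (some (fin.1 + fin.2))

-- ===== PRECONDITION & SPEC =====
-- Pre_ excludes only the empty list, on which A raises IndexError reading the first element.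
def Pre_get_longest_same_div_count (lista_principala : List Int) : Prop := lista_principala ≠ []
instance (lista_principala : List Int) : Decidable (Pre_get_longest_same_div_count lista_principala) := by
  unfold Pre_get_longest_same_div_count; infer_instance
def pvWitness_get_longest_same_div_count : List Int := [2, 6, 8, 10, 7]

def Spec_get_longest_same_div_count (lista_principala : List Int) (out : List Int) : Prop := out = get_longest_same_div_count_alt lista_principala
instance (lista_principala : List Int) (out : List Int) : Decidable (Spec_get_longest_same_div_count lista_principala out) := by unfold Spec_get_longest_same_div_count; infer_instance

-- ===== CLAIM (what is proved, stated in full; the proofs are below) =====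
def Claim_equal_get_longest_same_div_count : Prop := ∀ (lista_principala : List Int), Dom_get_longest_same_div_count lista_principala → Pre_get_longest_same_div_count lista_principala → Spec_get_longest_same_div_count lista_principala (get_longest_same_div_count lista_principala)

-- ===== LEMMAS AND PROOFS =====

def pvF (n d : Nat) : Int := if d ∣ n then (if d * d = n then 1 else 2) else 0

theorem pvIcc_insert (a b : Nat) (h : a ≤ b) :
    Finset.Icc a b = insert a (Finset.Icc (a + 1) b) := by
  ext x; simp [Finset.mem_Icc, Finset.mem_insert]; omega

theorem pvTauLoop_sum (n : Nat) (k : Nat) :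
    ∀ (i : Nat), 1 ≤ i → n.sqrt + 1 - i = k → ∀ t : Int,
      pvTauLoop (n : Int) (i : Int) t = t + ∑ d ∈ Finset.Icc i n.sqrt, pvF n d := by
  induction k with
  | zero =>
    intro i h1 hk t
    have hs : n.sqrt < i := by omega
    have hcond : ¬ ((i : Int) * (i : Int) ≤ (n : Int)) := by
      have : n < i * i := Nat.sqrt_lt.mp hs
      push_cast
      exact_mod_cast not_le.mpr (by exact_mod_cast this)
    rw [pvTauLoop, if_neg hcond]
    rw [Finset.Icc_eq_empty (by omega)]
    simp
  | succ k ih =>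
    intro i h1 hk t
    have hs : i ≤ n.sqrt := by omega
    have hcond : (i : Int) * (i : Int) ≤ (n : Int) := by exact_mod_cast Nat.le_sqrt.mp hs
    rw [pvTauLoop, if_pos hcond]
    have hc : ((i : Int) + 1) = ((i + 1 : Nat) : Int) := by push_cast; ring
    rw [hc, ih (i+1) (by omega) (by omega)]
    rw [pvIcc_insert i n.sqrt hs, Finset.sum_insert (by simp [Finset.mem_Icc])]
    have hmod : (PySem.Int.mod (n : Int) (i : Int) = 0) ↔ (i ∣ n) := by
      rw [PySem.Int.mod_eq_zero_iff_dvd]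
      exact_mod_cast Int.natCast_dvd_natCast
    have hsq : ((i : Int) * (i : Int) = (n : Int)) ↔ (i * i = n) := by exact_mod_cast Nat.cast_inj
    unfold pvF
    split_ifs with hd hq hq' <;> simp_all <;> ring

theorem pvTau_eq_card_divisors (n : Nat) (hn : 1 ≤ n) :
    (∑ d ∈ Finset.Icc 1 n.sqrt, pvF n d) = (n.divisors.card : Int) := by
  have hn0 : n ≠ 0 := by omega
  -- sets
  set S' : Finset Nat := n.divisors.filter (fun d => d * d < n) with hS'
  set E : Finset Nat := n.divisors.filter (fun d => d * d = n) with hE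
  set L : Finset Nat := n.divisors.filter (fun d => n < d * d) with hL
  -- sum over Icc = sum over small divisors
  have h1 : (∑ d ∈ Finset.Icc 1 n.sqrt, pvF n d)
      = ∑ d ∈ (Finset.Icc 1 n.sqrt).filter (fun d => d ∣ n), (if d * d = n then (1:Int) else 2) := by
    rw [Finset.sum_filter]
    apply Finset.sum_congr rfl
    intro d _
    unfold pvF
    split_ifs <;> simp_all
  have hSeq : (Finset.Icc 1 n.sqrt).filter (fun d => d ∣ n)
      = n.divisors.filter (fun d => d * d ≤ n) := by
    ext d
    simp [Finset.mem_Icc, Nat.mem_divisors, hn0, ← Nat.le_sqrt]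
    constructor
    · rintro ⟨⟨h1, h2⟩, h3⟩; exact ⟨h3, h2⟩
    · rintro ⟨h3, h2⟩; exact ⟨⟨Nat.pos_of_dvd_of_pos h3 hn, h2⟩, h3⟩
  rw [h1, hSeq]
  -- split small divisors by d*d = n
  have hsplit : (n.divisors.filter (fun d => d * d ≤ n)).filter (fun d => d * d = n) = E := by
    rw [hE, Finset.filter_filter]
    apply Finset.filter_congr
    intro d _; constructor
    · rintro ⟨_, h⟩; exact h
    · intro h; omega
  have hsplit2 : (n.divisors.filter (fun d => d * d ≤ n)).filter (fun d => ¬ (d * d = n)) = S' := by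
    rw [hS', Finset.filter_filter]
    apply Finset.filter_congr
    intro d _; constructor
    · rintro ⟨h1, h2⟩; omega
    · intro h; omega
  have hsum : (∑ d ∈ n.divisors.filter (fun d => d * d ≤ n), (if d * d = n then (1:Int) else 2))
      = (E.card : Int) + 2 * (S'.card : Int) := by
    rw [← Finset.sum_filter_add_sum_filter_not _ (fun d => d * d = n), hsplit, hsplit2]
    rw [Finset.sum_congr rfl (fun d hd => if_pos (by simpa [hE, Nat.mem_divisors] using (Finset.mem_filter.mp hd).2))]
    rw [Finset.sum_congr rfl (fun d hd => if_neg (by have := (Finset.mem_filter.mp hd).2; simpa [hS'] using by omega))]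
    simp [mul_comm]
  rw [hsum]
  -- the mirror bijection d ↦ n / d between big and small divisors
  have hLS : L.card = S'.card := by
    apply Finset.card_bij' (fun d _ => n / d) (fun d _ => n / d)
    · intro d hd
      rw [hL, Finset.mem_filter, Nat.mem_divisors] at hd
      obtain ⟨⟨hdvd, _⟩, hbig⟩ := hd
      have hdpos : 0 < d := Nat.pos_of_dvd_of_pos hdvd hn
      have hepos : 0 < n / d := Nat.div_pos (Nat.le_of_dvd hn hdvd) hdpos
      have hmul : d * (n / d) = n := Nat.mul_div_cancel' hdvd
      have helt : n / d < d := by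
        by_contra hc
        push_neg at hc
        have : d * d ≤ d * (n / d) := Nat.mul_le_mul_left d hc
        omega
      rw [hS', Finset.mem_filter, Nat.mem_divisors]
      refine ⟨⟨Nat.div_dvd_of_dvd hdvd, hn0⟩, ?_⟩
      calc (n / d) * (n / d) < d * (n / d) := by
            exact Nat.mul_lt_mul_of_lt_of_le helt (le_refl _) hepos
        _ = n := hmul
    · intro d hd
      rw [hS', Finset.mem_filter, Nat.mem_divisors] at hd
      obtain ⟨⟨hdvd, _⟩, hsmall⟩ := hd
      have hdpos : 0 < d := Nat.pos_of_dvd_of_pos hdvd hn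
      have hmul : d * (n / d) = n := Nat.mul_div_cancel' hdvd
      have helt : d < n / d := by
        by_contra hc
        push_neg at hc
        have : d * (n / d) ≤ d * d := Nat.mul_le_mul_left d hc
        omega
      rw [hL, Finset.mem_filter, Nat.mem_divisors]
      refine ⟨⟨Nat.div_dvd_of_dvd hdvd, hn0⟩, ?_⟩
      calc n = d * (n / d) := hmul.symm
        _ < (n / d) * (n / d) := by
            exact Nat.mul_lt_mul_of_lt_of_le helt (le_refl _) (by omega)
    · intro d hd
      rw [hL, Finset.mem_filter, Nat.mem_divisors] at hd
      exact Nat.div_div_self hd.1.1 hn0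
    · intro d hd
      rw [hS', Finset.mem_filter, Nat.mem_divisors] at hd
      exact Nat.div_div_self hd.1.1 hn0
  -- divisors split as small (≤) and large, small as strict and exact
  have htot : (n.divisors.filter (fun d => d * d ≤ n)).card + L.card = n.divisors.card := by
    rw [hL]
    have := Finset.card_filter_add_card_filter_not (s := n.divisors) (fun d => d * d ≤ n)
    rw [Finset.filter_congr (fun d _ => by constructor <;> intro h <;> omega :
      ∀ d ∈ n.divisors, ¬ (d * d ≤ n) ↔ n < d * d)] at this
    exact this
  have hsmallsplit : E.card + S'.card = (n.divisors.filter (fun d => d * d ≤ n)).card := by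
    have := Finset.card_filter_add_card_filter_not (s := n.divisors.filter (fun d => d * d ≤ n)) (fun d => d * d = n)
    rw [hsplit, hsplit2] at this
    exact this
  have hcard : E.card + 2 * S'.card = n.divisors.card := by omega
  push_cast [← hcard]
  ring

theorem pvMid_card (n : Nat) (hn : 2 ≤ n) :
    ((Finset.Icc 2 (n / 2)).filter (· ∣ n)).card + 2 = n.divisors.card := by
  have hn0 : n ≠ 0 := by omega
  have hmid : (Finset.Icc 2 (n / 2)).filter (· ∣ n)
      = n.divisors.filter (fun d => 2 ≤ d ∧ d ≤ n / 2) := by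
    ext d
    simp [Finset.mem_Icc, Nat.mem_divisors, hn0]
    tauto
  have hrest : n.divisors.filter (fun d => ¬ (2 ≤ d ∧ d ≤ n / 2)) = {1, n} := by
    ext d
    simp only [Finset.mem_filter, Nat.mem_divisors, Finset.mem_insert, Finset.mem_singleton]
    constructor
    · rintro ⟨⟨hdvd, _⟩, hnot⟩
      have hd1 : 1 ≤ d := Nat.pos_of_dvd_of_pos hdvd (by omega)
      by_cases h1 : d = 1
      · exact Or.inl h1
      right
      by_contra hdn
      apply hnot
      refine ⟨by omega, ?_⟩
      have h2 : 2 ≤ n / d := by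
        have hdltn : d < n := lt_of_le_of_ne (Nat.le_of_dvd (by omega) hdvd) hdn
        by_contra hc
        have hle1 : n / d ≤ 1 := by omega
        have hmm := Nat.mul_div_cancel' hdvd
        have hd2 : d * (n / d) ≤ d * 1 := Nat.mul_le_mul_left d hle1
        omega
      have h2d : 2 * d ≤ n := by nlinarith [Nat.mul_div_cancel' hdvd]
      omega
    · intro h
      rcases h with h | h
      · refine ⟨⟨by rw [h]; exact Nat.one_dvd n, hn0⟩, ?_⟩
        rw [h]; omega
      · refine ⟨⟨by rw [h], hn0⟩, ?_⟩
        rw [h]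
        have := Nat.div_lt_self (by omega : 0 < n) (by omega : 1 < (2:Nat))
        omega
  have hsum := Finset.card_filter_add_card_filter_not (s := n.divisors) (fun d => 2 ≤ d ∧ d ≤ n / 2)
  rw [hrest] at hsum
  have hcard2 : ({1, n} : Finset Nat).card = 2 := by
    rw [Finset.card_insert_of_notMem (by simp; omega), Finset.card_singleton]
  rw [hmid]
  omega

theorem pvCountP_range (m : Nat) (p : Nat → Bool) : (List.range m).countP p = ((Finset.range m).filter (fun k => p k)).card := by
  induction m with
  | zero => simp
  | succ m ih =>
    rw [List.range_succ, List.countP_append, Finset.range_add_one, Finset.filter_insert]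
    by_cases h : p m
    · rw [if_pos h, Finset.card_insert_of_notMem (by simp)]
      simp [List.countP_cons, h, ih]
    · rw [if_neg h]
      simp [List.countP_cons, h, ih]

theorem pvRangeFilter_card (n : Nat) (hn : 2 ≤ n) :
    ((Finset.range (n / 2 - 1)).filter (fun k => (2 + k) ∣ n)).card
      = ((Finset.Icc 2 (n / 2)).filter (· ∣ n)).card := by
  refine Finset.card_bij' (fun k _ => 2 + k) (fun d _ => d - 2) ?_ ?_ ?_ ?_
  · intro k hk
    beta_reduce
    simp only [Finset.mem_filter, Finset.mem_range] at hk
    simp only [Finset.mem_filter, Finset.mem_Icc]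
    exact ⟨⟨by omega, by omega⟩, hk.2⟩
  · intro d hd
    beta_reduce
    simp only [Finset.mem_filter, Finset.mem_Icc] at hd
    simp only [Finset.mem_filter, Finset.mem_range]
    constructor
    · omega
    · have h2 : 2 + (d - 2) = d := by omega
      rw [h2]; exact hd.2
  · intro k hk
    beta_reduce
    simp only [Finset.mem_filter, Finset.mem_range] at hk
    omega
  · intro d hd
    beta_reduce
    simp only [Finset.mem_filter, Finset.mem_Icc] at hd
    omega

theorem pvDivCount_eq (nr : Int) : nr_divizori nr = pvDivCount nr := by
  unfold nr_divizori pvDivCount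
  by_cases h1 : nr = 1
  · simp [h1]
  rw [if_neg h1, if_neg h1]
  by_cases h0 : nr < 2
  · rw [if_pos h0]
    have hfd : PySem.Int.floordiv nr 2 < 1 := by
      rw [PySem.Int.floordiv_lt_iff_lt_mul (by omega)]
      omega
    rw [PySem.List.pyRange_one_eq_nil (by omega)]
    simp
  · rw [if_neg h0]
    have h2 : 2 ≤ nr := by omega
    obtain ⟨n, rfl⟩ : ∃ n : Nat, nr = (n : Int) := ⟨nr.toNat, by omega⟩
    have hn2 : 2 ≤ n := by exact_mod_cast h2
    have hfd : PySem.Int.floordiv (n : Int) 2 = ((n / 2 : Nat) : Int) := by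
      exact_mod_cast PySem.Int.floordiv_natCast n 2
    have hfun : (fun (acc : Int) (i : Int) => if PySem.Int.mod (n : Int) i = 0 then acc + 1 else acc)
        = (fun acc i => if (fun i => decide (PySem.Int.mod (n : Int) i = 0)) i = true then acc + 1 else acc) := by
      funext acc i; simp
    rw [hfd, hfun, PySem.List.foldl_count_if]
    rw [PySem.List.pyRange_one, List.countP_map]
    have htn : (((n / 2 : Nat) : Int) + 1 - 2).toNat = n / 2 - 1 := by omega
    rw [htn]
    have hpred : ((fun i => decide (PySem.Int.mod (n : Int) i = 0)) ∘ (fun k : Nat => (2 : Int) + (k : Int)))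
        = (fun k : Nat => decide ((2 + k) ∣ n)) := by
      funext k
      simp only [Function.comp]
      congr 1
      rw [PySem.Int.mod_eq_zero_iff_dvd]
      rw [show ((2:Int) + (k:Int)) = (((2 + k : Nat)) : Int) by push_cast; ring]
      rw [Int.natCast_dvd_natCast]
    rw [hpred, pvCountP_range]
    simp only [decide_eq_true_eq]
    rw [pvRangeFilter_card n hn2]
    have hb := pvTauLoop_sum n (n.sqrt + 1 - 1) 1 (by omega) rfl 0
    rw [show ((1:Nat) : Int) = (1 : Int) by norm_num] at hb
    rw [hb, pvTau_eq_card_divisors n (by omega)]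
    have hm := pvMid_card n hn2
    push_cast [← hm]
    ring

theorem pvCountsStep_eq (d : PySem.Dict Int Int) (acc : List Int) (x : Int)
    (hinv : ∀ k v, d.get? k = some v → v = pvDivCount k) :
    pvCountsStep (d, acc) x
      = (if d.contains x then d else d.insert x (pvDivCount x), acc ++ [pvDivCount x]) := by
  unfold pvCountsStep
  by_cases hc : d.contains x
  · simp only [hc, if_pos]
    have hsome : (d.get? x).isSome := by
      rw [← PySem.Dict.contains_eq_isSome_get?]; exact hc
    obtain ⟨v, hv⟩ := Option.isSome_iff_exists.mp hsome
    have hgd : d.getD x 0 = pvDivCount x := by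
      rw [PySem.Dict.getD_eq_get?_getD, hv, Option.getD_some]
      exact hinv x v hv
    rw [hgd]
  · simp only [hc, if_neg, Bool.false_eq_true, if_false]
    rw [PySem.Dict.getD_eq_get?_getD, PySem.Dict.get?_insert_self, Option.getD_some]

theorem pvCountsInv_insert (d : PySem.Dict Int Int) (x : Int)
    (hinv : ∀ k v, d.get? k = some v → v = pvDivCount k) :
    ∀ k v, ((if d.contains x then d else d.insert x (pvDivCount x)).get? k = some v) → v = pvDivCount k := by
  intro k v hkv
  by_cases hc : d.contains x
  · rw [if_pos hc] at hkv; exact hinv k v hkv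
  · rw [if_neg hc] at hkv
    by_cases hk : k = x
    · subst hk
      rw [PySem.Dict.get?_insert_self] at hkv
      exact (Option.some_inj.mp hkv).symm
    · rw [PySem.Dict.get?_insert_of_ne d _ hk] at hkv
      exact hinv k v hkv

theorem pvCounts_eq (l : List Int) :
    ∀ (d : PySem.Dict Int Int) (acc : List Int),
      (∀ k v, d.get? k = some v → v = pvDivCount k) →
      (l.foldl pvCountsStep (d, acc)).2 = acc ++ l.map pvDivCount := by
  induction l with
  | nil => intro d acc _; simp
  | cons x xs ih =>
    intro d acc hinv
    rw [List.foldl_cons, pvCountsStep_eq d acc x hinv,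
      ih _ _ (pvCountsInv_insert d x hinv), List.map_cons]
    simp

-- c[j] read through pyGetD is A's divisor count of l[j]
theorem pvBridge (l : List Int) (j : Nat) (hj : j < l.length) :
    PySem.List.pyGetD (l.map pvDivCount) ((j : Int)) 0
      = nr_divizori (PySem.List.pyGetD l ((j : Int)) 0) := by
  rw [PySem.List.pyGetD_natCast, PySem.List.pyGetD_natCast]
  rw [List.getD_eq_getElem?_getD, List.getD_eq_getElem?_getD]
  rw [List.getElem?_map]
  rw [List.getElem?_eq_getElem hj]
  simp [pvDivCount_eq]

theorem pvSliceNil (l : List Int) (a : Int) (h : 0 ≤ a) :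
    PySem.List.slice l (some a) (some a) = [] := by
  rw [PySem.List.slice_toNat _ h h]
  simp

theorem pvSliceSnoc (l : List Int) (s i : Int) (h0 : 0 ≤ s) (hsi : s ≤ i) (hi : i < l.length) :
    PySem.List.slice l (some s) (some i) ++ [PySem.List.pyGetD l i 0]
      = PySem.List.slice l (some s) (some (i + 1)) := by
  have h0i : 0 ≤ i := le_trans h0 hsi
  rw [PySem.List.slice_toNat _ h0 h0i, PySem.List.slice_toNat _ h0 (by omega)]
  have hit : (i + 1).toNat = i.toNat + 1 := by omega
  have hgt : i.toNat + 1 - s.toNat = (i.toNat - s.toNat) + 1 := by omega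
  have hd : (l.drop s.toNat)[i.toNat - s.toNat]? = l[i.toNat]? := by
    rw [List.getElem?_drop]
    congr 1
    omega
  rw [hit, hgt, List.take_succ, hd, List.getElem?_eq_getElem (show i.toNat < l.length by omega)]
  rw [PySem.List.pyGetD_eq_getElem l 0 h0i (by exact_mod_cast hi)]
  simp

theorem pvMainLoop (l : List Int) (hl : 1 ≤ l.length) :
    ∀ (j : Nat), 1 ≤ j → j ≤ l.length →
    ∃ bs bl s : Int,
      (PySem.List.pyRange 1 (j : Int) 1).foldl (pvBStep (l.map pvDivCount)) (0, 0, 0) = (bs, bl, s) ∧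
      0 ≤ s ∧ s < (j : Int) ∧
      (PySem.List.pyRange 1 (j : Int) 1).foldl (pvAStep l)
          (0, [], 1, nr_divizori (PySem.List.pyGetD l 0 0), [PySem.List.pyGetD l 0 0]) =
        (bl, PySem.List.slice l (some bs) (some (bs + bl)), (j : Int) - s,
          PySem.List.pyGetD (l.map pvDivCount) ((j : Int) - 1) 0,
          PySem.List.slice l (some s) (some (j : Int))) := by
  intro j
  induction j with
  | zero => intro h1 _; omega
  | succ j ih =>
    intro _ hj
    by_cases hj0 : j = 0
    · -- base case j+1 = 1 : nothing folded yet
      subst hj0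
      refine ⟨0, 0, 0, ?_, le_refl 0, by norm_num, ?_⟩
      · rw [show ((1:Nat) : Int) = (1:Int) by norm_num, PySem.List.pyRange_one_eq_nil (le_refl 1)]
        rfl
      · rw [show ((1:Nat) : Int) = (1:Int) by norm_num, PySem.List.pyRange_one_eq_nil (le_refl 1)]
        rw [List.foldl_nil]
        have h1 : PySem.List.slice l (some 0) (some (0 + 0)) = ([] : List Int) := by
          rw [show (0 + 0 : Int) = 0 by norm_num]; exact pvSliceNil l 0 (le_refl 0)
        have h2 : PySem.List.slice l (some 0) (some 1) = [PySem.List.pyGetD l 0 0] := by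
          rw [show (1 : Int) = 0 + 1 by norm_num, ← pvSliceSnoc l 0 0 (le_refl (0:Int)) (le_refl (0:Int)) (by exact_mod_cast hl)]
          rw [pvSliceNil l 0 (le_refl 0), List.nil_append]
        have h3 : PySem.List.pyGetD (l.map pvDivCount) ((1:Int) - 1) 0
            = nr_divizori (PySem.List.pyGetD l 0 0) := by
          rw [show ((1:Int) - 1) = ((0:Nat) : Int) by norm_num]
          exact pvBridge l 0 (by omega)
        rw [h1, h2, h3]
        norm_num
    · -- inductive step: fold one more index j (1 ≤ j < l.length)
      have h1j : 1 ≤ j := by omega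
      have hjN : j < l.length := by omega
      obtain ⟨bs, bl, s, hB, hs0, hsj, hA⟩ := ih h1j (by omega)
      have hsplit : PySem.List.pyRange 1 ((j + 1 : Nat) : Int) 1
          = PySem.List.pyRange 1 (j : Int) 1 ++ [(j : Int)] := by
        rw [show (((j + 1 : Nat)) : Int) = (j : Int) + 1 by push_cast; ring]
        exact PySem.List.pyRange_one_succ_right (by exact_mod_cast h1j)
      have hbr : PySem.List.pyGetD (l.map pvDivCount) ((j : Int)) 0
          = nr_divizori (PySem.List.pyGetD l ((j : Int)) 0) := pvBridge l j hjN
      have hjm : ((j + 1 : Nat) : Int) - 1 = (j : Int) := by push_cast; ring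
      rw [hsplit, List.foldl_append, List.foldl_append, hB, hA, List.foldl_cons, List.foldl_cons,
        List.foldl_nil, List.foldl_nil]
      by_cases heq : PySem.List.pyGetD (l.map pvDivCount) ((j : Int)) 0
          = PySem.List.pyGetD (l.map pvDivCount) ((j : Int) - 1) 0
      · -- same divisor count: current run extends
        refine ⟨bs, bl, s, ?_, hs0, by push_cast; omega, ?_⟩
        · unfold pvBStep
          dsimp only
          rw [if_neg (by simpa using heq)]
        · unfold pvAStep
          dsimp only
          rw [if_pos (by rw [← hbr]; exact heq)]
          rw [pvSliceSnoc l s (j : Int) hs0 (by omega) (by exact_mod_cast hjN)]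
          rw [hjm, ← heq, hbr]
          have : ((j : Int)) - s + 1 = ((j + 1 : Nat) : Int) - s := by push_cast; ring
          rw [this, show (j : Int) + 1 = ((j + 1 : Nat) : Int) by push_cast; ring]
      · -- run breaks at j
        by_cases hgt : (j : Int) - s > bl
        · refine ⟨s, (j : Int) - s, (j : Int), ?_, by omega, by push_cast; omega, ?_⟩
          · unfold pvBStep
            dsimp only
            rw [if_pos (by simpa using heq), if_pos hgt]
          · unfold pvAStep
            dsimp only
            rw [if_neg (by rw [hbr] at heq; exact heq), if_pos hgt]
            rw [hjm, hbr]
            have e1 : PySem.List.slice l (some s) (some (s + ((j:Int) - s)))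
                = PySem.List.slice l (some s) (some (j : Int)) := by ring_nf
            have e2 : (1 : Int) = ((j + 1 : Nat) : Int) - (j : Int) := by push_cast; ring
            have e3 : PySem.List.slice l (some (j:Int)) (some ((j + 1 : Nat) : Int))
                = [PySem.List.pyGetD l ((j:Int)) 0] := by
              rw [show (((j + 1 : Nat)) : Int) = (j : Int) + 1 by push_cast; ring]
              rw [← pvSliceSnoc l (j:Int) (j:Int) (by omega) (le_refl _) (by exact_mod_cast hjN)]
              rw [pvSliceNil l (j:Int) (by omega), List.nil_append]
            rw [e1, ← e2, e3]
        · refine ⟨bs, bl, (j : Int), ?_, by omega, by push_cast; omega, ?_⟩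
          · unfold pvBStep
            dsimp only
            rw [if_pos (by simpa using heq), if_neg hgt]
          · unfold pvAStep
            dsimp only
            rw [if_neg (by rw [hbr] at heq; exact heq), if_neg hgt]
            rw [hjm, hbr]
            have e2 : (1 : Int) = ((j + 1 : Nat) : Int) - (j : Int) := by push_cast; ring
            have e3 : PySem.List.slice l (some (j:Int)) (some ((j + 1 : Nat) : Int))
                = [PySem.List.pyGetD l ((j:Int)) 0] := by
              rw [show (((j + 1 : Nat)) : Int) = (j : Int) + 1 by push_cast; ring]
              rw [← pvSliceSnoc l (j:Int) (j:Int) (by omega) (le_refl _) (by exact_mod_cast hjN)]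
              rw [pvSliceNil l (j:Int) (by omega), List.nil_append]
            rw [← e2, e3]

theorem pv_final (l : List Int) (hpre : l ≠ []) :
    get_longest_same_div_count l = get_longest_same_div_count_alt l := by
  have hl : 1 ≤ l.length := by
    cases l with
    | nil => exact absurd rfl hpre
    | cons x xs => simp
  unfold get_longest_same_div_count get_longest_same_div_count_alt
  dsimp only
  have hcounts : (l.foldl pvCountsStep (PySem.Dict.empty, [])).2 = l.map pvDivCount := by
    rw [pvCounts_eq l PySem.Dict.empty [] (by intro k v hkv; rw [PySem.Dict.get?_empty] at hkv; cases hkv)]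
    simp
  rw [hcounts, List.length_map]
  obtain ⟨bs, bl, s, hB, hs0, hsj, hA⟩ := pvMainLoop l hl l.length hl (le_refl _)
  rw [hB, hA]
  by_cases hgt : ((l.length : Int)) - s > bl
  · rw [if_pos hgt, if_pos hgt]
    dsimp only
    congr 1
    ring
  · rw [if_neg hgt, if_neg hgt]

-- ===== VERDICT (by name: the statement is the Claim_ definition above) =====
theorem get_longest_same_div_count_spec : Claim_equal_get_longest_same_div_count := by
  intro l _ hpre
  unfold Spec_get_longest_same_div_count
  exact pv_final l hpre
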